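-- pv_equiv track=rewrite | github.com/lintothoppil/MentAi | student_module/utils/__init__.py | get_course_duration
-- ===== SOURCE A (Python) =====
-- def get_course_duration(department):
--     """Get the standard duration for a department/course"""
--     dept_upper = department.upper()
--
--     # MCA and MBA are 2-year programs
--     if 'MCA' in dept_upper or 'MBA' in dept_upper or 'BUSINESS' in dept_upper:
--         return 2
--
--     # IMCA is 5-year program
--     if 'IMCA' in dept_upper:
--         return 5
--
--     # All engineering programs are 4 years
--     if any(dept in dept_upper for dept in ['COMPUTER SCIENCE', 'MECHANICAL', 'CIVIL', 'ELECTRICAL', 'ELECTRONICS']):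
--         return 4
--
--     # Default to 4 years
--     return 4
-- ===== SOURCE B (Python) =====
-- def get_course_duration(department):
--     """Get the standard duration for a department/course.
--
--     Every program is 4 years except the 2-year business programs
--     (MCA/MBA/anything with BUSINESS).  The original's IMCA branch is
--     unreachable ('IMCA' contains 'MCA', so branch 1 already fired) and
--     its engineering branch returns the default 4, so this single test
--     is exactly equivalent.
--     """
--     d = department.upper()
--     return 2 if ('MCA' in d or 'MBA' in d or 'BUSINESS' in d) else 4
-- ===== Notes on version B (the rewrite author's own statement) =====
-- stated objective: simpler
-- what changed: Collapses A's three-stage branch chain to a single business-keyword test returning 2 or 4, using the facts that the IMCA branch is dead (IMCA contains MCA) and the engineering branch equals the default.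
import Mathlib
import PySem

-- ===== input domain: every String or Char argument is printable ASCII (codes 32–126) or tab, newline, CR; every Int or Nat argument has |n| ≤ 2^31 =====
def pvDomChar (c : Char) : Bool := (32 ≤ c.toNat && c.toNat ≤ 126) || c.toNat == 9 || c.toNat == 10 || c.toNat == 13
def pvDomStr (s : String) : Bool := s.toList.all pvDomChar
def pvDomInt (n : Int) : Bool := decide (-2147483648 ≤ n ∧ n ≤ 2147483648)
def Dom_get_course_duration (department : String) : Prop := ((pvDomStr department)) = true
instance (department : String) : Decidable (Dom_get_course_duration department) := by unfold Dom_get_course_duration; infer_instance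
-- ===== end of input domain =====

-- B collapses A's branch chain to one business-keyword test returning 2 or 4
-- (A's IMCA branch is dead since 'IMCA' contains 'MCA', and A's engineering
-- branch returns the same value as its default); objective: simpler.

-- ===== PORT A =====
def get_course_duration (department : String) : Int :=
  let dept_upper := PySem.Str.upper department
  if PySem.Str.isIn "MCA" dept_upper || PySem.Str.isIn "MBA" dept_upper || PySem.Str.isIn "BUSINESS" dept_upper then 2
  else if PySem.Str.isIn "IMCA" dept_upper then 5
  else if ["COMPUTER SCIENCE", "MECHANICAL", "CIVIL", "ELECTRICAL", "ELECTRONICS"].any (fun dept => PySem.Str.isIn dept dept_upper) then 4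
  else 4

-- ===== PORT B =====
def get_course_duration_alt (department : String) : Int :=
  let d := PySem.Str.upper department
  if PySem.Str.isIn "MCA" d || PySem.Str.isIn "MBA" d || PySem.Str.isIn "BUSINESS" d then 2 else 4

-- ===== PRECONDITION & SPEC =====
def Spec_get_course_duration (department : String) (out : Int) : Prop := out = get_course_duration_alt department
instance (department : String) (out : Int) : Decidable (Spec_get_course_duration department out) := by unfold Spec_get_course_duration; infer_instance

-- ===== CLAIM (what is proved, stated in full; the proofs are below) =====
def Claim_equal_get_course_duration : Prop := ∀ (department : String), Dom_get_course_duration department → Spec_get_course_duration department (get_course_duration department)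

-- ===== LEMMAS AND PROOFS =====

-- Any string containing "IMCA" contains "MCA", so A's IMCA branch never fires.
theorem isIn_MCA_of_isIn_IMCA (s : String) (h : PySem.Str.isIn "IMCA" s = true) :
    PySem.Str.isIn "MCA" s = true := by
  rw [PySem.Str.isIn_iff_infix] at h ⊢
  exact List.IsInfix.trans (l₂ := "IMCA".toList) (by decide) h

-- ===== VERDICT (by name: the statement is the Claim_ definition above) =====
theorem get_course_duration_spec : Claim_equal_get_course_duration := by
  intro d _
  unfold Spec_get_course_duration get_course_duration get_course_duration_alt
  dsimp only
  split_ifs with h1 h2 h3 <;> try rfl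
  · exact absurd (by simp only [isIn_MCA_of_isIn_IMCA _ h2, Bool.true_or]) h1
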